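-- pv_equiv track=rewrite | github.com/nordstroem/Advent-Of-Code-2021 | days/day24.py | to_sub_programs
-- ===== SOURCE A (Python) =====
-- def to_sub_programs(all_instructions):
--     sub_programs = []
--     program = [all_instructions[0]]
--     for instr in all_instructions[1:]:
--         if instr[0] == "inp":
--             sub_programs.append(program)
--             program = [instr]
--         else:
--             program.append(instr)
--
--     sub_programs.append(program)
--     return sub_programs
-- ===== SOURCE B (Python) =====
-- def to_sub_programs(all_instructions):
--     n = len(all_instructions)
--     bounds = [i for i in range(1, n) if all_instructions[i][0] == "inp"]
--     starts = [0] + bounds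
--     ends = bounds + [n]
--     return [all_instructions[s:e] for s, e in zip(starts, ends)]
-- ===== Notes on version B (the rewrite author's own statement) =====
-- stated objective: alternative
-- what changed: replaces A's accumulator-and-append scan with computing the list of boundary indices (positions of 'inp' after index 0) and then slicing the input at those boundaries
import Mathlib
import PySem

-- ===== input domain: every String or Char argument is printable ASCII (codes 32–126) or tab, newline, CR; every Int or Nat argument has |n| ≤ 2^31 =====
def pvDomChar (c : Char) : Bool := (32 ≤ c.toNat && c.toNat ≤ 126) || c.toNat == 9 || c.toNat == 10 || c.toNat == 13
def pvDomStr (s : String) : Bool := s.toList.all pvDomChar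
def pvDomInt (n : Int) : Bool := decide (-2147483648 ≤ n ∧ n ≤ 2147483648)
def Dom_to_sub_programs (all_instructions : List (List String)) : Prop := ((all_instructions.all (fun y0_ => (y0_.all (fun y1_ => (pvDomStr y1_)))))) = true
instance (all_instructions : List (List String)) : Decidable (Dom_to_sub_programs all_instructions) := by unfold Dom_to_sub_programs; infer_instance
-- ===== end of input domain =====

-- B replaces A's accumulator scan with a boundary-index-then-slice pass (alternative decomposition, same cost);
-- equivalence is claimed on inputs where A returns (nonempty list, no empty instruction in the tail).

-- instr[0] == "inp"; under Pre_ instr is nonempty, so pyGet? is some (Python raises IndexError on [])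
def isInp (instr : List String) : Bool := ((PySem.List.pyGet? instr 0).getD "") == "inp"

-- ===== PORT A =====
-- loop body: if instr[0] == "inp": flush program, start new; else: append to program
def aStep (st : List (List (List String)) × List (List String)) (instr : List String) :
    List (List (List String)) × List (List String) :=
  if isInp instr then (st.1 ++ [st.2], [instr]) else (st.1, st.2 ++ [instr])

def to_sub_programs (all_instructions : List (List String)) : List (List (List String)) :=
  match all_instructions with
  | [] => []   -- Python raises IndexError on all_instructions[0]; excluded by Pre_
  | h :: t =>   -- program = [all_instructions[0]]; loop over all_instructions[1:]
    let st := t.foldl aStep ([], [h])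
    st.1 ++ [st.2]   -- sub_programs.append(program)

-- ===== PORT B =====
def to_sub_programs_alt (all_instructions : List (List String)) : List (List (List String)) :=
  let n : Int := all_instructions.length
  let bounds : List Int := (PySem.List.pyRange 1 n 1).filter
      (fun i => isInp ((PySem.List.pyGet? all_instructions i).getD []))
  let starts := 0 :: bounds
  let ends := bounds ++ [n]
  (starts.zip ends).map (fun se => PySem.List.slice all_instructions (some se.1) (some se.2))

-- ===== PRECONDITION & SPEC =====
-- exactly where Python A returns: it raises IndexError on the empty list (all_instructions[0])
-- and on an empty instruction in the tail (instr[0])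
def Pre_to_sub_programs (all_instructions : List (List String)) : Prop :=
  all_instructions ≠ [] ∧ ∀ instr ∈ all_instructions.tail, instr ≠ []
instance (all_instructions : List (List String)) : Decidable (Pre_to_sub_programs all_instructions) := by
  unfold Pre_to_sub_programs; infer_instance

def pvWitness_to_sub_programs : List (List String) :=
  [["inp", "w"], ["add", "x", "y"], ["inp", "z"], ["mul", "z", "2"]]

def Spec_to_sub_programs (all_instructions : List (List String)) (out : List (List (List String))) : Prop := out = to_sub_programs_alt all_instructions
instance (all_instructions : List (List String)) (out : List (List (List String))) : Decidable (Spec_to_sub_programs all_instructions out) := by unfold Spec_to_sub_programs; infer_instance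

-- ===== CLAIM (what is proved, stated in full; the proofs are below) =====
def Claim_equal_to_sub_programs : Prop := ∀ (all_instructions : List (List String)), Dom_to_sub_programs all_instructions → Pre_to_sub_programs all_instructions → Spec_to_sub_programs all_instructions (to_sub_programs all_instructions)

-- ===== LEMMAS AND PROOFS =====

-- reference splitter: current program + remaining instructions
def goSplit : List (List String) → List (List String) → List (List (List String))
  | prog, [] => [prog]
  | prog, a :: t => if isInp a then prog :: goSplit [a] t else goSplit (prog ++ [a]) t

-- cut xs at the given boundary positions, starting the current piece at s
def chop (xs : List (List String)) : Nat → List Nat → List (List (List String))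
  | s, [] => [(xs.drop s).take (xs.length - s)]
  | s, b :: bs => ((xs.drop s).take (b - s)) :: chop xs b bs

-- positions (offset by k) of 'inp' instructions
def boundsOf : List (List String) → Nat → List Nat
  | [], _ => []
  | a :: t, k => if isInp a then k :: boundsOf t (k + 1) else boundsOf t (k + 1)

theorem foldA (t : List (List String)) :
    ∀ (acc : List (List (List String))) (prog : List (List String)),
      (t.foldl aStep (acc, prog)).1 ++ [(t.foldl aStep (acc, prog)).2] = acc ++ goSplit prog t := by
  induction t with
  | nil => intro acc prog; simp [goSplit]
  | cons a t ih =>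
    intro acc prog
    by_cases h : isInp a
    · simp [aStep, h, goSplit, ih]
    · simp [aStep, h, goSplit, ih]

theorem boundsOf_shift (t : List (List String)) :
    ∀ (s k : Nat), boundsOf t (s + k) = (boundsOf t k).map (· + s) := by
  induction t with
  | nil => intro s k; simp [boundsOf]
  | cons a t ih =>
    intro s k
    simp only [boundsOf]
    by_cases h : isInp a
    · rw [if_pos h, if_pos h, List.map_cons,
        show s + k + 1 = s + (k + 1) from by omega, ih s (k + 1)]
      simp [Nat.add_comm]
    · rw [if_neg h, if_neg h,
        show s + k + 1 = s + (k + 1) from by omega, ih s (k + 1)]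

theorem drop_app (p ys : List (List String)) (s : Nat) :
    (p ++ ys).drop (p.length + s) = ys.drop s := by
  rw [List.drop_append]
  simp [List.drop_eq_nil_of_le, Nat.add_comm]

theorem chop_shift (bs : List Nat) :
    ∀ (p ys : List (List String)) (s : Nat),
      chop (p ++ ys) (p.length + s) (bs.map (· + p.length)) = chop ys s bs := by
  induction bs with
  | nil =>
    intro p ys s
    simp only [List.map_nil, chop, drop_app]
    congr 1
    simp
    omega
  | cons b bs ih =>
    intro p ys s
    simp only [List.map_cons, chop]
    congr 1
    · rw [show b + p.length - (p.length + s) = b - s from by omega, drop_app]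
    · rw [show b + p.length = p.length + b from by omega]
      exact ih p ys b

theorem go_chop (t : List (List String)) :
    ∀ (prog : List (List String)),
      goSplit prog t = chop (prog ++ t) 0 (boundsOf t prog.length) := by
  induction t with
  | nil => intro prog; simp [goSplit, chop, boundsOf]
  | cons a t ih =>
    intro prog
    simp only [goSplit, boundsOf]
    by_cases h : isInp a
    · rw [if_pos h, if_pos h]
      simp only [chop, List.drop_zero, Nat.sub_zero]
      congr 1
      · rw [List.take_left]
      · rw [ih [a]]
        have hb : boundsOf t (prog.length + 1) = (boundsOf t 1).map (· + prog.length) :=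
          boundsOf_shift t prog.length 1
        have hc := chop_shift (boundsOf t 1) prog (a :: t) 0
        simp only [Nat.add_zero] at hc
        rw [hb]
        simp only [List.singleton_append, List.length_cons, List.length_nil, Nat.zero_add]
        exact hc.symm
    · rw [if_neg h, if_neg h, ih (prog ++ [a])]
      simp [List.append_assoc]

theorem filt (t : List (List String)) :
    ∀ (pre : List (List String)),
      (PySem.List.pyRange (pre.length : Int) ((pre.length + t.length : Nat) : Int) 1).filter
          (fun i => isInp ((PySem.List.pyGet? (pre ++ t) i).getD []))
        = (boundsOf t pre.length).map (Nat.cast : Nat → Int) := by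
  induction t with
  | nil =>
    intro pre
    rw [PySem.List.pyRange_one_eq_nil (by simp)]
    simp [boundsOf]
  | cons a t ih =>
    intro pre
    rw [PySem.List.pyRange_one_cons (by simp only [List.length_cons]; push_cast; omega)]
    simp only [List.filter_cons, PySem.List.pyGet?_append_length pre t a, Option.getD_some]
    have hrw : (pre ++ a :: t) = ((pre ++ [a]) ++ t) := by simp
    have hlen : ((pre.length : Int) + 1) = (((pre ++ [a]).length : Nat) : Int) := by
      simp
    have hlen2 : ((pre.length + (a :: t).length : Nat) : Int)
        = (((pre ++ [a]).length + t.length : Nat) : Int) := by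
      simp only [List.length_append, List.length_cons, List.length_nil]; push_cast; omega
    rw [hrw, hlen, hlen2, ih (pre ++ [a])]
    by_cases h : isInp a
    · simp [h, boundsOf]
    · simp [h, boundsOf]

theorem zipchop (bs : List Nat) :
    ∀ (s : Nat) (xs : List (List String)),
      ((((s : Int) :: bs.map (Nat.cast : Nat → Int)).zip
          (bs.map (Nat.cast : Nat → Int) ++ [(xs.length : Int)])).map
        (fun se => PySem.List.slice xs (some se.1) (some se.2))) = chop xs s bs := by
  induction bs with
  | nil =>
    intro s xs
    simp [chop, PySem.List.slice_natCast]
  | cons b bs ih =>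
    intro s xs
    simp only [List.map_cons, List.cons_append, List.zip_cons_cons, chop]
    rw [PySem.List.slice_natCast]
    exact congrArg _ (ih b xs)

-- ===== VERDICT (by name: the statement is the Claim_ definition above) =====
theorem to_sub_programs_spec : Claim_equal_to_sub_programs := by
  intro xs _ hpre
  unfold Spec_to_sub_programs
  match xs, hpre with
  | h :: t, _ =>
    show (t.foldl aStep ([], [h])).1 ++ [(t.foldl aStep ([], [h])).2] = _
    rw [foldA t [] [h], List.nil_append, go_chop t [h]]
    unfold to_sub_programs_alt
    have hf := filt t [h]
    simp only [List.length_cons, List.length_nil, List.singleton_append, Nat.zero_add,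
      Nat.add_comm 1, Nat.cast_one] at hf
    have hz := zipchop (boundsOf t 1) 0 (h :: t)
    simp only [Nat.cast_zero, List.length_cons] at hz
    simp only [List.length_cons]
    rw [hf, hz]
    simp
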